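-- pv_equiv track=rewrite | github.com/s-nlp/kbqa | caches/ner_truecase/true_case_detection.py | predictions_reranking
-- ===== SOURCE A (Python) =====
-- def predictions_reranking(pred_main, pred_secondary):
--     """Module for the predictions reranking"""
--
--     # pred_main, pred_secondary - string of predictions separated by comma
--
--     preds_main = pred_main.split(", ")
--     preds_secondary = pred_secondary.split(", ")
--     preds_joined = []
--     min_index = min(len(preds_main), len(preds_secondary))
--
--     # if the length of pred_main and pred_secondary coincide
--     for k in range(min_index):
--         if preds_main[k] == preds_secondary[k]:
--             preds_joined.append(preds_main[k])
--         else: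
--             preds_joined.append(preds_main[k])
--             preds_joined.append(preds_secondary[k])
--
--     # if pred_main larger than pred_secondary
--     if len(preds_main) > len(preds_secondary):
--         diff = len(preds_main) - len(preds_secondary)
--         subset = preds_main[-diff:]
--         for _, elem in enumerate(subset):
--             preds_joined.append(elem)
--
--     # if pred_secondary larger than pred_main
--     elif len(preds_main) < len(preds_secondary):
--         diff = len(preds_secondary) - len(preds_main)
--         subset = preds_secondary[-diff:]
--         for _, elem in enumerate(subset):
--             preds_joined.append(elem)
--     return ", ".join(preds_joined)
-- ===== SOURCE B (Python) =====
-- def predictions_reranking(pred_main, pred_secondary):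
--     """Module for the predictions reranking"""
--
--     # Recursive pairwise merge of the two prediction lists: no indices, no
--     # length comparison, no tail slicing -- the leftover tail falls out of
--     # the base cases.
--     def merge(xs, ys):
--         if not xs:
--             return ys
--         if not ys:
--             return xs
--         head = [xs[0]] if xs[0] == ys[0] else [xs[0], ys[0]]
--         return head + merge(xs[1:], ys[1:])
--
--     return ", ".join(merge(pred_main.split(", "), pred_secondary.split(", ")))
-- ===== Notes on version B (the rewrite author's own statement) =====
-- stated objective: simpler
-- what changed: Replaced the index loop over range(min) plus the length-comparison branches with negative tail slices by a single recursive pairwise merge of the two split lists whose base cases yield the leftover tail.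
import Mathlib
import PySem

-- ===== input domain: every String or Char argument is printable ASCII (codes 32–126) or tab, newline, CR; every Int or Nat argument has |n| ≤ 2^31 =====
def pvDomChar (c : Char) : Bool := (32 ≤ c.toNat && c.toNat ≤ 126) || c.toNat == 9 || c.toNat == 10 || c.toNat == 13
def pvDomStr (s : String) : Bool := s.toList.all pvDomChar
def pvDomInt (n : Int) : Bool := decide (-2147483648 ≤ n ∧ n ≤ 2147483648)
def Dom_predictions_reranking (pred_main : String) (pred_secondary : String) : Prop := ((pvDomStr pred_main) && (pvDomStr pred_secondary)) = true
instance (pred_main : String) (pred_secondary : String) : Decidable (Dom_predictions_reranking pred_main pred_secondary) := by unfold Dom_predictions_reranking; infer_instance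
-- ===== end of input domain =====

-- B replaces A's index loop over range(min) plus length-branch/negative-slice tail handling
-- with a single recursive pairwise merge of the two split lists (objective: simpler).

-- ===== PORT A =====
def predictions_reranking (pred_main : String) (pred_secondary : String) : String :=
  let preds_main := (PySem.Str.split? pred_main ", ").getD []       -- sep is non-empty, split? never none
  let preds_secondary := (PySem.Str.split? pred_secondary ", ").getD []
  let min_index : Nat := min preds_main.length preds_secondary.length
  let preds_joined : List String :=
    (PySem.List.pyRange 0 (min_index : Int) 1).foldl
      (fun acc k =>
        if PySem.List.pyGetD preds_main k "" = PySem.List.pyGetD preds_secondary k "" then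
          acc ++ [PySem.List.pyGetD preds_main k ""]
        else
          acc ++ [PySem.List.pyGetD preds_main k "", PySem.List.pyGetD preds_secondary k ""]) []
  let preds_joined : List String :=
    if preds_secondary.length < preds_main.length then
      let diff : Int := (preds_main.length : Int) - (preds_secondary.length : Int)
      let subset := PySem.List.slice preds_main (some (-diff)) none
      subset.foldl (fun acc elem => acc ++ [elem]) preds_joined
    else if preds_main.length < preds_secondary.length then
      let diff : Int := (preds_secondary.length : Int) - (preds_main.length : Int)
      let subset := PySem.List.slice preds_secondary (some (-diff)) none
      subset.foldl (fun acc elem => acc ++ [elem]) preds_joined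
    else preds_joined
  PySem.Str.join ", " preds_joined

-- ===== PORT B =====
def pvMerge : List String → List String → List String
  | [], ys => ys
  | x :: xs, [] => x :: xs
  | x :: xs, y :: ys => (if x = y then [x] else [x, y]) ++ pvMerge xs ys

def predictions_reranking_alt (pred_main : String) (pred_secondary : String) : String :=
  PySem.Str.join ", "
    (pvMerge ((PySem.Str.split? pred_main ", ").getD [])
             ((PySem.Str.split? pred_secondary ", ").getD []))

-- ===== PRECONDITION & SPEC =====
def Spec_predictions_reranking (pred_main : String) (pred_secondary : String) (out : String) : Prop := out = predictions_reranking_alt pred_main pred_secondary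
instance (pred_main : String) (pred_secondary : String) (out : String) : Decidable (Spec_predictions_reranking pred_main pred_secondary out) := by unfold Spec_predictions_reranking; infer_instance

-- ===== CLAIM (what is proved, stated in full; the proofs are below) =====
def Claim_equal_predictions_reranking : Prop := ∀ (pred_main : String) (pred_secondary : String), Dom_predictions_reranking pred_main pred_secondary → Spec_predictions_reranking pred_main pred_secondary (predictions_reranking pred_main pred_secondary)

-- ===== LEMMAS AND PROOFS =====

-- A's loop body as a flatMap generator
def pvGen (xs ys : List String) (k : Nat) : List String :=
  if xs.getD k "" = ys.getD k "" then [xs.getD k ""] else [xs.getD k "", ys.getD k ""]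

-- the pure-list content of A equals pvMerge
lemma pv_flat_merge : ∀ (xs ys : List String),
    (List.range (min xs.length ys.length)).flatMap (pvGen xs ys)
      ++ (if ys.length < xs.length then xs.drop ys.length
          else if xs.length < ys.length then ys.drop xs.length else [])
      = pvMerge xs ys := by
  intro xs
  induction xs with
  | nil =>
    intro ys
    cases ys with
    | nil => simp [pvMerge]
    | cons y ys => simp [pvMerge]
  | cons x xs ih =>
    intro ys
    cases ys with
    | nil => simp [pvMerge]
    | cons y ys =>
      have hmin : min (x :: xs).length (y :: ys).length = min xs.length ys.length + 1 := by
        simp [List.length_cons]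
      rw [hmin, List.range_succ_eq_map, List.flatMap_cons, List.flatMap_map]
      have hgen : (fun k => pvGen (x :: xs) (y :: ys) (Nat.succ k)) = pvGen xs ys := by
        funext k; simp [pvGen]
      have h0 : pvGen (x :: xs) (y :: ys) 0 = (if x = y then [x] else [x, y]) := by
        simp [pvGen]
      rw [hgen, h0]
      have htail :
          (if (y :: ys).length < (x :: xs).length then (x :: xs).drop (y :: ys).length
           else if (x :: xs).length < (y :: ys).length then (y :: ys).drop (x :: xs).length else [])
          = (if ys.length < xs.length then xs.drop ys.length
             else if xs.length < ys.length then ys.drop xs.length else []) := by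
        simp only [List.length_cons]
        split_ifs with h1 h2 h3 h4 <;> first | rfl | omega
      rw [htail, List.append_assoc, ih ys, pvMerge]

-- ===== VERDICT (by name: the statement is the Claim_ definition above) =====
-- A's whole post-split computation, on arbitrary lists, equals pvMerge
lemma pv_A_lists (xs ys : List String) :
    (let pj : List String :=
      (PySem.List.pyRange 0 ((min xs.length ys.length : Nat) : Int) 1).foldl
        (fun acc k =>
          if PySem.List.pyGetD xs k "" = PySem.List.pyGetD ys k "" then
            acc ++ [PySem.List.pyGetD xs k ""]
          else
            acc ++ [PySem.List.pyGetD xs k "", PySem.List.pyGetD ys k ""]) []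
     if ys.length < xs.length then
       (PySem.List.slice xs (some (-((xs.length : Int) - (ys.length : Int)))) none).foldl
         (fun acc elem => acc ++ [elem]) pj
     else if xs.length < ys.length then
       (PySem.List.slice ys (some (-((ys.length : Int) - (xs.length : Int)))) none).foldl
         (fun acc elem => acc ++ [elem]) pj
     else pj) = pvMerge xs ys := by
  have hbody : (fun (acc : List String) (k : Int) =>
      if PySem.List.pyGetD xs k "" = PySem.List.pyGetD ys k "" then
        acc ++ [PySem.List.pyGetD xs k ""]
      else
        acc ++ [PySem.List.pyGetD xs k "", PySem.List.pyGetD ys k ""])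
      = fun acc k => acc ++
          (if PySem.List.pyGetD xs k "" = PySem.List.pyGetD ys k "" then
            [PySem.List.pyGetD xs k ""]
          else [PySem.List.pyGetD xs k "", PySem.List.pyGetD ys k ""]) := by
    funext acc k; split <;> rfl
  have hpj : (PySem.List.pyRange 0 ((min xs.length ys.length : Nat) : Int) 1).foldl
        (fun acc k =>
          if PySem.List.pyGetD xs k "" = PySem.List.pyGetD ys k "" then
            acc ++ [PySem.List.pyGetD xs k ""]
          else
            acc ++ [PySem.List.pyGetD xs k "", PySem.List.pyGetD ys k ""]) []
      = (List.range (min xs.length ys.length)).flatMap (pvGen xs ys) := by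
    rw [hbody, PySem.List.foldl_append_eq_flatMap, PySem.List.pyRange_zero_natCast,
        List.flatMap_map, List.nil_append]
    congr 1
    funext k
    simp [pvGen, PySem.List.pyGetD_natCast]
  rw [← pv_flat_merge xs ys]
  simp only [hpj]
  by_cases h1 : ys.length < xs.length
  · have hk : 0 < xs.length - ys.length := by omega
    have hc : (-((xs.length : Int) - (ys.length : Int))) = -((xs.length - ys.length : Nat) : Int) := by
      omega
    simp only [h1, if_pos, hc, PySem.List.slice_from_neg_natCast xs _ hk,
      PySem.List.foldl_append_eq_flatMap]
    have : xs.length - (xs.length - ys.length) = ys.length := by omega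
    simp [this]
  · by_cases h2 : xs.length < ys.length
    · have hk : 0 < ys.length - xs.length := by omega
      have hc : (-((ys.length : Int) - (xs.length : Int))) = -((ys.length - xs.length : Nat) : Int) := by
        omega
      simp only [h1, h2, if_pos, hc, PySem.List.slice_from_neg_natCast ys _ hk,
        PySem.List.foldl_append_eq_flatMap]
      have : ys.length - (ys.length - xs.length) = xs.length := by omega
      simp [this]
    · simp [h1, h2]

theorem predictions_reranking_spec : Claim_equal_predictions_reranking := by
  intro pm ps _
  unfold Spec_predictions_reranking predictions_reranking predictions_reranking_alt
  exact congrArg (PySem.Str.join ", ") (pv_A_lists _ _)
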